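-- pv_equiv track=rewrite | github.com/good-epic/mess3_saes | latent_geometry_create_metrics.py | infer_component_display_names
-- ===== SOURCE A (Python) =====
-- from collections import defaultdict
-- from typing import Any, Dict, Iterable, List, Optional, Sequence, Tuple
--
-- def infer_component_display_names(component_order: List[str], component_meta: Dict[str, Dict[str, Any]]) -> Dict[str, str]:
--     counters: Dict[str, int] = defaultdict(int)
--     display: Dict[str, str] = {}
--     for name in component_order:
--         meta = component_meta.get(name, {})
--         comp_type = meta.get("type") or name.split("_")[0]
--         idx = counters[comp_type]
--         if idx == 0:
--             label = comp_type
--         else: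
--             label = f"{comp_type}_{idx}"
--         counters[comp_type] += 1
--         display[name] = label
--     return display
-- ===== SOURCE B (Python) =====
-- def infer_component_display_names(component_order, component_meta):
--     # Phase 1: group names by component type, preserving first-seen order of types
--     # and within-type occurrence order.
--     groups = {}
--     for name in component_order:
--         meta = component_meta.get(name, {})
--         comp_type = meta.get("type") or name.split("_")[0]
--         groups.setdefault(comp_type, []).append(name)
--     # Phase 2: label each group's occurrences by their position in the group.
--     labels = {}
--     for comp_type, names in groups.items():
--         for i, name in enumerate(names):
--             labels[name] = comp_type if i == 0 else f"{comp_type}_{i}"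
--     # Phase 3: emit in component_order order (duplicates keep first position, last label).
--     return {name: labels[name] for name in component_order}
-- ===== Notes on version B (the rewrite author's own statement) =====
-- stated objective: alternative
-- what changed: Replaces the single interleaved pass that maintains per-type counters with a three-phase pipeline: group names by component type, label each group by enumeration position, then emit labels in original order.
import Mathlib
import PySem

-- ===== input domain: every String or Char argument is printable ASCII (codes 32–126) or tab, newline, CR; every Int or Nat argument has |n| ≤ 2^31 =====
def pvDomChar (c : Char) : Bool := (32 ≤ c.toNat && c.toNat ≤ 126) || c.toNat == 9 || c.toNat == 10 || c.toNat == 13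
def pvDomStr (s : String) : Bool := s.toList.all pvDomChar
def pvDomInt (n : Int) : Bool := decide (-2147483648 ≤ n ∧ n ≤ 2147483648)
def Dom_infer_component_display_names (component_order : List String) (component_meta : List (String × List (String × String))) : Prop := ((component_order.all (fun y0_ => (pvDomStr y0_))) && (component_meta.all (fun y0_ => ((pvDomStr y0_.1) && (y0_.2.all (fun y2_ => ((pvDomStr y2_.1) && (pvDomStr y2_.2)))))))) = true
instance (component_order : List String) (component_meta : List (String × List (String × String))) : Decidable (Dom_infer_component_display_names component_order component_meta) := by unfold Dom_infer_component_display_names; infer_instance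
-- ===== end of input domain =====

-- B replaces A's single counter-carrying pass by a group-then-label-then-emit pipeline (alternative decomposition, same cost).

-- shared helpers: both Pythons compute `component_meta.get(name, {}).get("type") or name.split("_")[0]`
-- and the label `comp_type if i == 0 else f"{comp_type}_{i}"` by the same expressions.
def pvCompType (component_meta : List (String × List (String × String))) (name : String) : String :=
  let m := (PySem.Dict.mk component_meta).getD name []
  -- `or` falls through exactly on a missing "type" key or an empty-string value (the only falsy str);
  -- `name.split("_")` has a non-"" separator (split? = some) and is never empty, so `[0]` is headD.
  match (PySem.Dict.mk m).get? "type" with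
  | some t => if t = "" then ((PySem.Str.split? name "_").getD []).headD "" else t
  | none => ((PySem.Str.split? name "_").getD []).headD ""

def pvLabel (comp_type : String) (idx : Int) : String :=
  if idx = 0 then comp_type else comp_type ++ "_" ++ PySem.Int.toStr idx

-- ===== PORT A =====
-- loop body of A: read the counter (defaultdict → getD 0), build the label, bump the counter, record the label
def pvStepA (component_meta : List (String × List (String × String)))
    (st : PySem.Dict String Int × PySem.Dict String String) (name : String) :
    PySem.Dict String Int × PySem.Dict String String :=
  let comp_type := pvCompType component_meta name
  let idx := st.1.getD comp_type 0
  let label := pvLabel comp_type idx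
  (st.1.insert comp_type (idx + 1), st.2.insert name label)

def infer_component_display_names (component_order : List String) (component_meta : List (String × List (String × String))) : List (String × String) :=
  (component_order.foldl (pvStepA component_meta) (PySem.Dict.empty, PySem.Dict.empty)).2.items

-- ===== PORT B =====
-- phase 1: groups.setdefault(comp_type, []).append(name)  (= d[k] = d.get(k, []) + [name], i.e. Dict.modify)
def pvGroups (component_order : List String) (component_meta : List (String × List (String × String))) :
    PySem.Dict String (List String) :=
  component_order.foldl
    (fun g name => g.modify (pvCompType component_meta name) [] (fun l => l ++ [name]))
    PySem.Dict.empty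

-- phase 2: for comp_type, names in groups.items(): for i, name in enumerate(names): labels[name] = …
def pvLabels (component_order : List String) (component_meta : List (String × List (String × String))) :
    PySem.Dict String String :=
  (pvGroups component_order component_meta).items.foldl
    (fun lab p => p.2.zipIdx.foldl (fun lab2 q => lab2.insert q.1 (pvLabel p.1 (q.2 : Int))) lab)
    PySem.Dict.empty

-- phase 3: {name: labels[name] for name in component_order}; every name is in labels, so [name] is getD
def infer_component_display_names_alt (component_order : List String) (component_meta : List (String × List (String × String))) : List (String × String) :=
  let labels := pvLabels component_order component_meta
  (component_order.foldl (fun d name => d.insert name (labels.getD name "")) PySem.Dict.empty).items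

-- ===== PRECONDITION & SPEC =====
def Spec_infer_component_display_names (component_order : List String) (component_meta : List (String × List (String × String))) (out : List (String × String)) : Prop := out = infer_component_display_names_alt component_order component_meta
instance (component_order : List String) (component_meta : List (String × List (String × String))) (out : List (String × String)) : Decidable (Spec_infer_component_display_names component_order component_meta out) := by unfold Spec_infer_component_display_names; infer_instance

-- ===== CLAIM (what is proved, stated in full; the proofs are below) =====
def Claim_equal_infer_component_display_names : Prop := ∀ (component_order : List String) (component_meta : List (String × List (String × String))), Dom_infer_component_display_names component_order component_meta → Spec_infer_component_display_names component_order component_meta (infer_component_display_names component_order component_meta)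

-- ===== LEMMAS AND PROOFS =====

-- The proof reduces both ports to one shape — a fold of `insert` over a list of (key, value)
-- "operations" — and compares the two operation lists filtered per key.

-- A's operations: the name at position i gets the label indexed by how many earlier names share its type.
def pvOpsA (cm : List (String × List (String × String))) (co : List String) : List (String × String) :=
  co.zipIdx.map (fun q =>
    (q.1, pvLabel (pvCompType cm q.1) ((((co.take q.2).map (pvCompType cm)).count (pvCompType cm q.1) : Int))))

-- B's phase-2 operations for one group, and for the whole groups dict.
def pvOpsG (t : String) (g : List String) : List (String × String) :=
  g.zipIdx.map (fun q => (q.1, pvLabel t (q.2 : Int)))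

def pvOpsL (cm : List (String × List (String × String))) (co : List String) : List (String × String) :=
  (pvGroups co cm).items.flatMap (fun p => pvOpsG p.1 p.2)

-- lookup in a fold of inserts = last operation carrying that key
theorem pv_get?_foldl_insert (ps : List (String × String)) (d : PySem.Dict String String) (k : String) :
    (ps.foldl (fun d p => d.insert p.1 p.2) d).get? k =
      ((ps.filter (fun p => p.1 == k)).getLast?).elim (d.get? k) (fun p => some p.2) := by
  induction ps using List.reverseRecOn with
  | nil => simp
  | append_singleton ps p ih =>
    rw [List.foldl_append, List.filter_append]
    simp only [List.foldl]
    rw [PySem.Dict.get?_insert]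
    by_cases h : p.1 = k
    · simp [List.filter, h]
    · have hb : (p.1 == k) = false := by simp [h]
      simp [List.filter, hb, Ne.symm h, ih]

theorem pv_A_fst (cm : List (String × List (String × String))) :
    ∀ (co : List String) (c : PySem.Dict String Int) (d : PySem.Dict String String),
      (co.foldl (pvStepA cm) (c, d)).1 =
        co.foldl (fun c n => c.insert (pvCompType cm n) (c.getD (pvCompType cm n) 0 + 1)) c := by
  intro co
  induction co with
  | nil => intro c d; rfl
  | cons n co ih =>
    intro c d
    simp only [List.foldl, pvStepA]
    exact ih _ _

theorem pv_counters_getD (cm : List (String × List (String × String))) (co : List String)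
    (c : PySem.Dict String Int) (t : String) :
    (co.foldl (fun c n => c.insert (pvCompType cm n) (c.getD (pvCompType cm n) 0 + 1)) c).getD t 0 =
      c.getD t 0 + ((co.map (pvCompType cm)).count t : Int) := by
  rw [← List.foldl_map (f := pvCompType cm)
        (g := fun (c : PySem.Dict String Int) t' => c.insert t' (c.getD t' 0 + 1))]
  exact PySem.Dict.getD_foldl_insert_add_one _ _ _

theorem pv_opsA_concat (cm : List (String × List (String × String))) (l : List String) (n : String) :
    pvOpsA cm (l ++ [n]) =
      pvOpsA cm l ++ [(n, pvLabel (pvCompType cm n) (((l.map (pvCompType cm)).count (pvCompType cm n) : Int)))] := by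
  unfold pvOpsA
  rw [List.zipIdx_append, List.map_append]
  congr 1
  · apply List.map_congr_left
    intro q hq
    obtain ⟨a, i⟩ := q
    have hi := (List.mem_zipIdx hq).2.1
    simp only at hi ⊢
    rw [List.take_append_of_le_length (by omega)]
  · simp [List.zipIdx]

theorem pv_A_eq_ops (cm : List (String × List (String × String))) (co : List String) :
    (co.foldl (pvStepA cm) (PySem.Dict.empty, PySem.Dict.empty)).2 =
      (pvOpsA cm co).foldl (fun d p => d.insert p.1 p.2) PySem.Dict.empty := by
  induction co using List.reverseRecOn with
  | nil => rfl
  | append_singleton l n ih =>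
    rw [List.foldl_append, pv_opsA_concat, List.foldl_append]
    simp only [List.foldl]
    have hfst := pv_A_fst cm l PySem.Dict.empty PySem.Dict.empty
    simp only [pvStepA, hfst, pv_counters_getD, PySem.Dict.getD_empty, zero_add, ih]

theorem pv_groups_concat (cm : List (String × List (String × String))) (l : List String) (n : String) :
    pvGroups (l ++ [n]) cm = (pvGroups l cm).modify (pvCompType cm n) [] (fun g => g ++ [n]) := by
  simp [pvGroups, List.foldl_append]

theorem pv_groups_getD (cm : List (String × List (String × String))) (co : List String) (t : String) :
    (pvGroups co cm).getD t [] = co.filter (fun n => pvCompType cm n == t) := by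
  unfold pvGroups
  rw [← List.foldl_map (f := fun n => (pvCompType cm n, n))
        (g := fun (d : PySem.Dict String (List String)) (p : String × String) =>
          d.modify p.1 [] (fun x => x ++ [p.2]))]
  rw [PySem.Dict.getD_foldl_modify_append]
  simp [List.filter_map, Function.comp_def]

theorem pv_groups_nodup (cm : List (String × List (String × String))) (co : List String) :
    (pvGroups co cm).keys.Nodup := by
  unfold pvGroups
  exact PySem.Dict.nodup_keys_foldl_modify_key co (pvCompType cm) [] _ _ (by simp [PySem.Dict.keys_empty])

theorem pv_mem_group_type (cm : List (String × List (String × String))) (co : List String)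
    {p : String × List String} (hp : p ∈ (pvGroups co cm).items) {m : String} (hm : m ∈ p.2) :
    pvCompType cm m = p.1 := by
  obtain ⟨t, g⟩ := p
  have hg : (pvGroups co cm).getD t [] = g :=
    PySem.Dict.getD_of_mem_items _ hp (pv_groups_nodup cm co) []
  rw [pv_groups_getD] at hg
  have := List.of_mem_filter (hg ▸ hm)
  simpa using this

theorem pv_filter_opsG_nil {t k : String} {g : List String} (h : ∀ m ∈ g, m ≠ k) :
    (pvOpsG t g).filter (fun p => p.1 == k) = [] := by
  unfold pvOpsG
  rw [List.filter_map]
  rw [List.filter_eq_nil_iff.mpr, List.map_nil]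
  rintro ⟨a, i⟩ hq
  have ha : a ∈ g := by
    have h' := List.mem_zipIdx hq
    simp only [Nat.sub_zero] at h'
    exact h'.2.2 ▸ List.getElem_mem _
  simpa using h a ha

theorem pv_opsG_concat (t : String) (g : List String) (n : String) :
    pvOpsG t (g ++ [n]) = pvOpsG t g ++ [(n, pvLabel t (g.length : Int))] := by
  unfold pvOpsG
  rw [List.zipIdx_append, List.map_append]
  simp [List.zipIdx]

theorem pv_glen (cm : List (String × List (String × String))) (l : List String) (t : String) :
    ((pvGroups l cm).getD t []).length = (l.map (pvCompType cm)).count t := by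
  rw [pv_groups_getD, List.count_eq_countP, List.countP_map, ← List.countP_eq_length_filter]
  rfl


-- replacing the (unique) entry of key t by its extension with n changes the per-key-k filtered
-- operations by exactly one trailing element when k = n, and not at all otherwise
theorem pv_flatMap_replace (cm : List (String × List (String × String))) (t n k : String)
    (g : List String) (ht : pvCompType cm n = t) :
    ∀ (its : List (String × List String)),
      (∀ p ∈ its, ∀ m ∈ p.2, pvCompType cm m = p.1) →
      (∀ p ∈ its, p.1 = t → p.2 = g) →
      (its.map Prod.fst).Nodup →
      ((its.map (fun p => if (p.1 == t) = true then (t, g ++ [n]) else p)).flatMap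
          (fun p => (pvOpsG p.1 p.2).filter (fun q => q.1 == k)))
        = its.flatMap (fun p => (pvOpsG p.1 p.2).filter (fun q => q.1 == k)) ++
            (if t ∈ its.map Prod.fst ∧ k = n then [(n, pvLabel t (g.length : Int))] else []) := by
  intro its
  induction its with
  | nil => simp
  | cons p its ih =>
    intro H1 H2 H3
    simp only [List.map_cons, List.flatMap_cons, List.nodup_cons] at H3 ⊢
    by_cases hp : p.1 = t
    · have hg : p.2 = g := H2 p (by simp) hp
      have hnt : t ∉ its.map Prod.fst := hp ▸ H3.1
      have htail : its.map (fun p' => if (p'.1 == t) = true then (t, g ++ [n]) else p') = its := by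
        have hid : ∀ p' ∈ its,
            (if (p'.1 == t) = true then (t, g ++ [n]) else p') = id p' := by
          intro p' hp'
          have hne : (p'.1 == t) = false := by
            simp only [beq_eq_false_iff_ne, ne_eq]
            intro h
            exact hnt (h ▸ List.mem_map_of_mem hp')
          simp [hne]
        rw [List.map_congr_left hid, List.map_id]
      have hhead : (p.1 == t) = true := by simp [hp]
      rw [htail]
      simp only [hhead, if_true]
      rw [pv_opsG_concat, List.filter_append]
      by_cases hk : k = n
      · subst hk
        have htailnil : its.flatMap (fun p' => (pvOpsG p'.1 p'.2).filter (fun q => q.1 == k)) = [] := by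
          rw [List.flatMap_eq_nil_iff]
          intro p' hp'
          apply pv_filter_opsG_nil
          intro m hm hmk
          have h1 := H1 p' (by simp [hp']) m hm
          rw [hmk, ht] at h1
          exact hnt (h1 ▸ List.mem_map_of_mem hp')
        rw [htailnil]
        simp [hp, hg]
      · have hnk : ((n : String) == k) = false := beq_eq_false_iff_ne.mpr (Ne.symm hk)
        have hsing : ([(n, pvLabel t (g.length : Int))].filter (fun q => q.1 == k)) = [] := by
          simp [List.filter, hnk]
        rw [hsing]
        simp [hp, hg, hk]
    · have hhead : (p.1 == t) = false := by simp [hp]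
      simp only [hhead, Bool.false_eq_true, if_false]
      rw [ih (fun p' hp' => H1 p' (by simp [hp'])) (fun p' hp' => H2 p' (by simp [hp'])) H3.2]
      have hcond : (t ∈ p.1 :: its.map Prod.fst ∧ k = n) ↔ (t ∈ its.map Prod.fst ∧ k = n) := by
        constructor
        · rintro ⟨h1, h2⟩
          rcases List.mem_cons.mp h1 with h | h
          · exact absurd h.symm hp
          · exact ⟨h, h2⟩
        · rintro ⟨h1, h2⟩
          exact ⟨List.mem_cons_of_mem _ h1, h2⟩
      simp only [List.append_assoc]
      congr 1
      congr 1
      exact (if_congr hcond rfl rfl).symm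

theorem pv_opsL_filter_concat (cm : List (String × List (String × String))) (l : List String)
    (n k : String) :
    (pvOpsL cm (l ++ [n])).filter (fun p => p.1 == k) =
      (pvOpsL cm l).filter (fun p => p.1 == k) ++
        (if k = n then [(n, pvLabel (pvCompType cm n) (((l.map (pvCompType cm)).count (pvCompType cm n) : Int)))] else []) := by
  unfold pvOpsL
  rw [pv_groups_concat]
  rw [show (pvGroups l cm).modify (pvCompType cm n) [] (fun g => g ++ [n]) =
        (pvGroups l cm).insert (pvCompType cm n) ((pvGroups l cm).getD (pvCompType cm n) [] ++ [n]) from rfl]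
  rw [List.filter_flatMap, List.filter_flatMap]
  by_cases hc : (pvGroups l cm).contains (pvCompType cm n)
  · rw [PySem.Dict.items_insert_of_contains _ _ hc]
    rw [pv_flatMap_replace cm (pvCompType cm n) n k ((pvGroups l cm).getD (pvCompType cm n) []) rfl
          (pvGroups l cm).items (fun p hp m hm => pv_mem_group_type cm l hp hm)
          (fun p hp hpt => by
            have h := PySem.Dict.getD_of_mem_items _ hp (pv_groups_nodup cm l) ([] : List String)
            rw [hpt] at h
            exact h.symm)
          (by
            have := pv_groups_nodup cm l
            simpa [PySem.Dict.keys] using this)]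
    have hmem : pvCompType cm n ∈ (pvGroups l cm).items.map Prod.fst := by
      have h := (PySem.Dict.contains_iff_mem_keys (d := pvGroups l cm) (k := pvCompType cm n)).mp hc
      simpa [PySem.Dict.keys] using h
    rw [pv_glen]
    by_cases hk : k = n <;> simp [hmem, hk]
  · rw [PySem.Dict.items_insert_of_not_contains _ _ (by simpa using hc)]
    have hg0 : (pvGroups l cm).getD (pvCompType cm n) [] = [] := PySem.Dict.getD_of_not_contains _ _ (by simpa using hc)
    have hcount : ((l.map (pvCompType cm)).count (pvCompType cm n)) = 0 := by
      rw [← pv_glen cm l, hg0]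
      rfl
    rw [List.flatMap_append, hg0, hcount]
    by_cases hk : k = n
    · simp [pvOpsG, List.zipIdx, pvLabel, hk]
    · simp [pvOpsG, List.zipIdx, pvLabel, hk, Ne.symm hk]

theorem pv_filters_eq (cm : List (String × List (String × String))) (co : List String) (k : String) :
    (pvOpsL cm co).filter (fun p => p.1 == k) = (pvOpsA cm co).filter (fun p => p.1 == k) := by
  induction co using List.reverseRecOn with
  | nil => simp [pvOpsL, pvOpsA, pvGroups, PySem.Dict.empty]
  | append_singleton l n ih =>
    rw [pv_opsL_filter_concat, pv_opsA_concat, List.filter_append, ih]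
    congr 1
    by_cases hk : k = n
    · simp [hk]
    · simp [hk, Ne.symm hk]

theorem pv_labels_eq_ops (cm : List (String × List (String × String))) (co : List String) :
    pvLabels co cm = (pvOpsL cm co).foldl (fun d p => d.insert p.1 p.2) PySem.Dict.empty := by
  unfold pvLabels pvOpsL
  rw [List.foldl_flatMap]
  congr 1
  funext lab p
  rw [pvOpsG, List.foldl_map]

theorem pv_opsA_map_fst (cm : List (String × List (String × String))) (co : List String) :
    (pvOpsA cm co).map Prod.fst = co := by
  unfold pvOpsA
  rw [List.map_map]
  exact List.zipIdx_map_fst 0 co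

theorem pv_opsB_map_fst (cm : List (String × List (String × String))) (co : List String) :
    (co.map (fun name => (name, (pvLabels co cm).getD name ""))).map Prod.fst = co := by
  rw [List.map_map]
  simp [Function.comp_def]

theorem pv_get?_eq (cm : List (String × List (String × String))) (co : List String) (k : String) :
    ((pvOpsA cm co).foldl (fun d p => d.insert p.1 p.2) PySem.Dict.empty).get? k =
      ((co.map (fun name => (name, (pvLabels co cm).getD name ""))).foldl
        (fun d p => d.insert p.1 p.2) PySem.Dict.empty).get? k := by
  rw [pv_get?_foldl_insert, pv_get?_foldl_insert]
  have hlab : (pvLabels co cm).get? k =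
      ((pvOpsA cm co).filter (fun p => p.1 == k)).getLast?.elim none (fun p => some p.2) := by
    rw [pv_labels_eq_ops, pv_get?_foldl_insert, ← pv_filters_eq, PySem.Dict.get?_empty]
  have hBfilter : ((co.map (fun name => (name, (pvLabels co cm).getD name ""))).filter
      (fun p => p.1 == k)) = (co.filter (fun name => name == k)).map
        (fun name => (name, (pvLabels co cm).getD name "")) := by
    rw [List.filter_map]
    rfl
  rw [hBfilter]
  by_cases hk : k ∈ co
  · have hne : co.filter (fun name => name == k) ≠ [] := by
      intro h
      have : k ∈ co.filter (fun name => name == k) := List.mem_filter.mpr ⟨hk, by simp⟩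
      simp [h] at this
    have hlast : (co.filter (fun name => name == k)).getLast? =
        some ((co.filter (fun name => name == k)).getLast hne) :=
      List.getLast?_eq_some_getLast hne
    have hlk : (co.filter (fun name => name == k)).getLast hne = k := by
      have hm := List.getLast_mem hne
      have := List.of_mem_filter hm
      simpa using this
    have hAne : (pvOpsA cm co).filter (fun p => p.1 == k) ≠ [] := by
      intro h
      have hk' : k ∈ (pvOpsA cm co).map Prod.fst := by rw [pv_opsA_map_fst]; exact hk
      obtain ⟨p, hp, hpk⟩ := List.mem_map.mp hk'
      have : p ∈ (pvOpsA cm co).filter (fun p => p.1 == k) :=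
        List.mem_filter.mpr ⟨hp, by simp [hpk]⟩
      simp [h] at this
    have hAlast : ((pvOpsA cm co).filter (fun p => p.1 == k)).getLast? =
        some (((pvOpsA cm co).filter (fun p => p.1 == k)).getLast hAne) :=
      List.getLast?_eq_some_getLast hAne
    rw [List.getLast?_map, hlast, hAlast]
    simp only [Option.map_some, Option.elim_some, hlk, PySem.Dict.get?_empty]
    rw [PySem.Dict.getD_eq_get?_getD, hlab, hAlast]
    simp only [Option.elim_some, Option.getD_some]
  · have hA0 : (pvOpsA cm co).filter (fun p => p.1 == k) = [] := by
      rw [List.filter_eq_nil_iff]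
      intro p hp
      have : p.1 ∈ co := by
        rw [← pv_opsA_map_fst cm co]
        exact List.mem_map_of_mem hp
      simp only [beq_iff_eq]
      intro h
      exact hk (h ▸ this)
    have hB0 : co.filter (fun name => name == k) = [] := by
      rw [List.filter_eq_nil_iff]
      intro a ha
      simp only [beq_iff_eq]
      intro h
      exact hk (h ▸ ha)
    rw [hA0, hB0]
    simp

theorem pv_dicts_items_eq (cm : List (String × List (String × String))) (co : List String) :
    ((pvOpsA cm co).foldl (fun d p => d.insert p.1 p.2) PySem.Dict.empty).items =
      ((co.map (fun name => (name, (pvLabels co cm).getD name ""))).foldl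
        (fun d p => d.insert p.1 p.2) PySem.Dict.empty).items := by
  have hkA : ((pvOpsA cm co).foldl (fun d p => d.insert p.1 p.2) PySem.Dict.empty).keys =
      PySem.Set.update [] ((pvOpsA cm co).map Prod.fst) := by
    have := PySem.Dict.keys_foldl_insert_key (pvOpsA cm co) Prod.fst (fun _ p => p.2)
      (PySem.Dict.empty)
    simpa [PySem.Dict.keys_empty] using this
  have hkB : ((co.map (fun name => (name, (pvLabels co cm).getD name ""))).foldl
      (fun d p => d.insert p.1 p.2) PySem.Dict.empty).keys =
      PySem.Set.update [] (((co.map (fun name => (name, (pvLabels co cm).getD name "")))).map Prod.fst) := by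
    have := PySem.Dict.keys_foldl_insert_key
      (co.map (fun name => (name, (pvLabels co cm).getD name ""))) Prod.fst (fun _ p => p.2)
      (PySem.Dict.empty)
    simpa [PySem.Dict.keys_empty] using this
  have hkeys : ((pvOpsA cm co).foldl (fun d p => d.insert p.1 p.2) PySem.Dict.empty).keys =
      ((co.map (fun name => (name, (pvLabels co cm).getD name ""))).foldl
        (fun d p => d.insert p.1 p.2) PySem.Dict.empty).keys := by
    rw [hkA, hkB, pv_opsA_map_fst, pv_opsB_map_fst]
  have hnA : ((pvOpsA cm co).foldl (fun d p => d.insert p.1 p.2) PySem.Dict.empty).keys.Nodup := by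
    have := PySem.Dict.nodup_keys_foldl_insert_key (pvOpsA cm co) Prod.fst (fun _ p => p.2)
      (PySem.Dict.empty) (by simp [PySem.Dict.keys_empty])
    simpa using this
  have hnB : ((co.map (fun name => (name, (pvLabels co cm).getD name ""))).foldl
      (fun d p => d.insert p.1 p.2) PySem.Dict.empty).keys.Nodup := by
    have := PySem.Dict.nodup_keys_foldl_insert_key
      (co.map (fun name => (name, (pvLabels co cm).getD name ""))) Prod.fst (fun _ p => p.2)
      (PySem.Dict.empty) (by simp [PySem.Dict.keys_empty])
    simpa using this
  rw [PySem.Dict.items_eq_map_keys _ hnA "", PySem.Dict.items_eq_map_keys _ hnB "", hkeys]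
  apply List.map_congr_left
  intro k _
  rw [PySem.Dict.getD_eq_get?_getD, PySem.Dict.getD_eq_get?_getD, pv_get?_eq]

-- ===== VERDICT (by name: the statement is the Claim_ definition above) =====
theorem infer_component_display_names_spec : Claim_equal_infer_component_display_names := by
  intro co cm _
  unfold Spec_infer_component_display_names infer_component_display_names infer_component_display_names_alt
  show _ = ((co.foldl (fun d name => d.insert name ((pvLabels co cm).getD name "")) PySem.Dict.empty).items)
  rw [pv_A_eq_ops]
  rw [show (co.foldl (fun d name => d.insert name ((pvLabels co cm).getD name "")) PySem.Dict.empty)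
        = (co.map (fun name => (name, (pvLabels co cm).getD name ""))).foldl
            (fun d p => d.insert p.1 p.2) PySem.Dict.empty from
        (List.foldl_map (f := fun name => (name, (pvLabels co cm).getD name ""))
          (g := fun (d : PySem.Dict String String) (p : String × String) => d.insert p.1 p.2)
          (l := co) (init := PySem.Dict.empty)).symm]
  exact pv_dicts_items_eq cm co
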